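-- pv_equiv track=rewrite | github.com/kubernetes-sigs/scheduler-plugins | analysis/combine_results.py | place_compare
-- ===== SOURCE A (Python) =====
-- from typing import Dict, Optional
--
-- def place_compare(a: Dict[int, int], b: Dict[int, int]) -> int:
--     """1 if a>b, 0 if equal, -1 if a<b (compare from highest priority down)."""
--     keys = sorted(set(a.keys()) | set(b.keys()), reverse=True)
--     for k in keys:
--         av = int(a.get(k, 0))
--         bv = int(b.get(k, 0))
--         if av > bv:
--             return 1
--         if av < bv:
--             return -1
--     return 0
-- ===== SOURCE B (Python) =====
-- def place_compare(a, b):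
--     """1 if a>b, 0 if equal, -1 if a<b (compare from highest priority down)."""
--     diffs = [k for k in a.keys() | b.keys() if a.get(k, 0) != b.get(k, 0)]
--     if not diffs:
--         return 0
--     m = max(diffs)
--     return 1 if int(a.get(m, 0)) > int(b.get(m, 0)) else -1
-- ===== Notes on version B (the rewrite author's own statement) =====
-- stated objective: alternative
-- what changed: Instead of sorting the whole key union descending and scanning for the first differing value, B collects the keys at which the two dicts differ and compares the values at the maximum such key (no sort).
import Mathlib
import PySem

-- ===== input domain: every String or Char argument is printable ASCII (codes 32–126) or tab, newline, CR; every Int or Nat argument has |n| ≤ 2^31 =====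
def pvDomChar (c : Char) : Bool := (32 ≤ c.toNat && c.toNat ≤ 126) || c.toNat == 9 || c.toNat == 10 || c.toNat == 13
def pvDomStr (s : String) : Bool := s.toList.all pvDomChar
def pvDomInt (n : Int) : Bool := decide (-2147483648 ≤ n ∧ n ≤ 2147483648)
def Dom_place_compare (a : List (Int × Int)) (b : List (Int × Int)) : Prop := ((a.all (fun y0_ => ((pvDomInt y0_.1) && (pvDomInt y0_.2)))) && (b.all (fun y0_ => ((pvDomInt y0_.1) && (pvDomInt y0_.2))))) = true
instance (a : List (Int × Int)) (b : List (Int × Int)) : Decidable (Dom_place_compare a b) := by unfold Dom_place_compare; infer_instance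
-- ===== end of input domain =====

-- B replaces A's sort of the key union (descending) + first-difference scan by collecting
-- the keys where the dicts differ and comparing the values at their maximum (objective: alternative,
-- sort-free single filter pass).

-- ===== PORT A =====
-- the for-loop over the sorted keys, with its early returns
def pvLoopA (da db : PySem.Dict Int Int) : List Int → Int
  | [] => 0
  | k :: ks =>
    let av := da.getD k 0
    let bv := db.getD k 0
    if av > bv then 1
    else if av < bv then -1
    else pvLoopA da db ks

def place_compare (a : List (Int × Int)) (b : List (Int × Int)) : Int :=
  let da := PySem.Dict.ofList a
  let db := PySem.Dict.ofList b
  let keys := PySem.List.sorted (PySem.Set.union (PySem.Set.ofList da.keys) db.keys) (fun k => k) true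
  pvLoopA da db keys

-- ===== PORT B =====
def place_compare_alt (a : List (Int × Int)) (b : List (Int × Int)) : Int :=
  let da := PySem.Dict.ofList a
  let db := PySem.Dict.ofList b
  let diffs := (PySem.Set.union (PySem.Set.ofList da.keys) db.keys).filter
    (fun k => da.getD k 0 ≠ db.getD k 0)
  match PySem.List.max? diffs (fun k => k) with   -- none ↔ diffs = [] : "if not diffs: return 0"
  | none => 0
  | some m => if da.getD m 0 > db.getD m 0 then 1 else -1

-- ===== PRECONDITION & SPEC =====
def Spec_place_compare (a : List (Int × Int)) (b : List (Int × Int)) (out : Int) : Prop := out = place_compare_alt a b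
instance (a : List (Int × Int)) (b : List (Int × Int)) (out : Int) : Decidable (Spec_place_compare a b out) := by unfold Spec_place_compare; infer_instance

-- ===== CLAIM (what is proved, stated in full; the proofs are below) =====
def Claim_equal_place_compare : Prop := ∀ (a : List (Int × Int)) (b : List (Int × Int)), Dom_place_compare a b → Spec_place_compare a b (place_compare a b)

-- ===== LEMMAS AND PROOFS =====

-- which keys the comparison cares about, and the sign reported there
def pvP (da db : PySem.Dict Int Int) (k : Int) : Bool := da.getD k 0 ≠ db.getD k 0
def pvSgn (da db : PySem.Dict Int Int) (k : Int) : Int := if da.getD k 0 > db.getD k 0 then 1 else -1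

-- A's scan returns the sign at the FIRST differing key of its (descending) key list
theorem pvLoopA_eq (da db : PySem.Dict Int Int) (L : List Int) :
    pvLoopA da db L = match L.filter (pvP da db) with
      | [] => 0
      | k :: _ => pvSgn da db k := by
  induction L with
  | nil => rfl
  | cons k ks ih =>
    show (if da.getD k 0 > db.getD k 0 then 1
      else if da.getD k 0 < db.getD k 0 then -1 else pvLoopA da db ks) = _
    rw [List.filter_cons]
    rcases lt_trichotomy (da.getD k 0) (db.getD k 0) with hlt | heq | hgt
    · have hp : pvP da db k = true := by simp [pvP]; omega
      rw [if_neg (by omega), if_pos hlt, hp]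
      show (-1 : Int) = pvSgn da db k
      unfold pvSgn; rw [if_neg (by omega)]
    · have hp : pvP da db k = false := by simp [pvP, heq]
      rw [if_neg (by omega), if_neg (by omega), hp]
      simpa using ih
    · have hp : pvP da db k = true := by simp [pvP]; omega
      rw [if_pos hgt, hp]
      show (1 : Int) = pvSgn da db k
      unfold pvSgn; rw [if_pos hgt]

-- ===== VERDICT (by name: the statement is the Claim_ definition above) =====
theorem place_compare_spec : Claim_equal_place_compare := by
  intro a b _
  unfold Spec_place_compare place_compare place_compare_alt
  show pvLoopA (PySem.Dict.ofList a) (PySem.Dict.ofList b)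
      (PySem.List.sorted (PySem.Set.union (PySem.Set.ofList (PySem.Dict.ofList a).keys)
        (PySem.Dict.ofList b).keys) (fun k => k) true)
    = match PySem.List.max? ((PySem.Set.union (PySem.Set.ofList (PySem.Dict.ofList a).keys)
          (PySem.Dict.ofList b).keys).filter
        (fun k => (PySem.Dict.ofList a).getD k 0 ≠ (PySem.Dict.ofList b).getD k 0))
        (fun k => k) with
      | none => 0
      | some m => if (PySem.Dict.ofList a).getD m 0 > (PySem.Dict.ofList b).getD m 0 then 1 else -1
  set da := PySem.Dict.ofList a with hda
  set db := PySem.Dict.ofList b with hdb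
  set K : List Int := PySem.Set.union (PySem.Set.ofList da.keys) db.keys with hK
  have hfe : (K.filter fun k => decide (da.getD k 0 ≠ db.getD k 0)) = K.filter (pvP da db) := by
    apply List.filter_congr; intro x _; simp [pvP]
  rw [pvLoopA_eq, hfe]
  have hperm : ((PySem.List.sorted K (fun k : Int => k) true).filter (pvP da db)).Perm
      (K.filter (pvP da db)) :=
    (PySem.List.sorted_perm K (fun k => k) true).filter _
  have hpw : ((PySem.List.sorted K (fun k : Int => k) true).filter (pvP da db)).Pairwise
      (fun x y : Int => y ≤ x) :=
    List.Pairwise.filter _ (PySem.List.sorted_pairwise_rev (xs := K) (key := fun k : Int => k))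
  rcases hF : K.filter (pvP da db) with _ | ⟨k, ks⟩
  · rw [hF] at hperm
    rw [List.Perm.eq_nil hperm]
    rfl
  · rcases hG : (PySem.List.sorted K (fun k : Int => k) true).filter (pvP da db) with _ | ⟨h', t'⟩
    · rw [hF, hG] at hperm
      exact absurd hperm.symm (by simp)
    rw [hF, hG] at hperm
    rw [hG] at hpw
    -- the head of the descending filtered list IS the max B picks out of the unsorted filter
    have hmax : PySem.List.max? (k :: ks) (fun x : Int => x) = some (ks.foldl max k) :=
      PySem.List.max?_id_cons k ks
    rw [hmax]
    have hub : ∀ x ∈ k :: ks, x ≤ ks.foldl max k := fun x hx =>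
      PySem.List.max?_isMax hmax x hx
    have hMmem : ks.foldl max k ∈ k :: ks := PySem.List.max?_mem hmax
    have hup : ∀ x ∈ h' :: t', x ≤ h' := by
      intro x hx
      rcases List.mem_cons.mp hx with rfl | hx
      · exact le_refl x
      · exact (List.pairwise_cons.mp hpw).1 x hx
    have h1 : h' ≤ ks.foldl max k := hub h' (hperm.subset (List.mem_cons_self))
    have h2 : ks.foldl max k ≤ h' := hup _ (hperm.symm.subset hMmem)
    show pvSgn da db h' = _
    rw [pvSgn, le_antisymm h1 h2]
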